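-- pv_equiv track=rewrite | github.com/BoudewijnKlijn/competitive_programming | leetcode/leetcode_1937.py | faster
-- ===== SOURCE A (Python) =====
-- from typing import List
--
-- def faster(points: List[List[int]]) -> int:
--     """Time limit exceeded.
--     141/157 passed."""
--     R = len(points)  # M
--     C = len(points[0])  # N
--
--     best = points[0]
--     for r, row_next in enumerate(points[1:], start=1):
--         best_next = [0] * C
--         for c_next, extra_points in enumerate(row_next):
--             best_next[c_next] = extra_points + max(
--                 current_points - abs(c_next - c_current)
--                 for c_current, current_points in enumerate(best)
--             )
--         best = best_next
--     return max(best)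
-- ===== SOURCE B (Python) =====
-- from typing import List
--
-- def faster(points: List[List[int]]) -> int:
--     # Two running-max sweeps per row replace the O(N) inner scan per cell.
--     C = len(points[0])
--     best = points[0]
--     for row in points[1:]:
--         left = []
--         run = best[0]
--         for v in best:
--             run = max(run - 1, v)
--             left.append(run)
--         right = []
--         run = best[-1]
--         for v in reversed(best):
--             run = max(run - 1, v)
--             right.append(run)
--         right.reverse()
--         best_next = [0] * C
--         for c, v in enumerate(row):
--             best_next[c] = v + max(left[c], right[c])
--         best = best_next
--     return max(best)
-- ===== Notes on version B (the rewrite author's own statement) =====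
-- stated objective: faster
-- what changed: The O(N) inner scan over all previous columns per cell is replaced by two running-max sweeps (left-to-right and right-to-left) over the previous row, resolving the |c-c'| distance cost in O(1) per cell.
import Mathlib
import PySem

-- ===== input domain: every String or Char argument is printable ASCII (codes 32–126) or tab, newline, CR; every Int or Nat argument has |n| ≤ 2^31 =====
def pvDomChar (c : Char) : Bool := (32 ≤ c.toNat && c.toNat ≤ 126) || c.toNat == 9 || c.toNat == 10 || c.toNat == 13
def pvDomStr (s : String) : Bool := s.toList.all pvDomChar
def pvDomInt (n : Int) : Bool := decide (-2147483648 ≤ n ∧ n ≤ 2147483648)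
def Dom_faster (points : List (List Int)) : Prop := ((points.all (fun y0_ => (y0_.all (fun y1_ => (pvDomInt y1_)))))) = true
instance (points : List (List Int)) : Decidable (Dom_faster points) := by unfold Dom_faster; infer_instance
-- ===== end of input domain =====

-- B replaces A's inner scan over all previous columns per cell by two running-max sweeps per row;
-- equality is proved on every input where A returns (Pre_ excludes exactly the inputs where A raises).

-- ===== PORT A =====
-- inner generator: max(current_points - abs(c_next - c_current) for c_current, current_points in enumerate(best))
-- Python max raises ValueError on an empty best; Pre_ keeps best nonempty, .getD 0 is the unreachable default.
def fasterInner (c : Int) (best : List Int) : Int :=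
  ((PySem.List.max? ((PySem.List.enumerate best 0).map (fun jp => jp.2 - |c - jp.1|)) (fun y => y)).getD 0)

-- points[0] raises IndexError on [] and max(best) raises ValueError on [] — excluded by Pre_; headD/getD 0 are the defaults there.
def faster (points : List (List Int)) : Int :=
  let C : Nat := (points.headD []).length
  let best := (points.drop 1).foldl (fun best rowNext =>
      (PySem.List.enumerate rowNext 0).foldl (fun bn ce =>
        PySem.List.pySetD bn ce.1 (ce.2 + fasterInner ce.1 best)) (List.replicate C (0 : Int))) (points.headD [])
  (PySem.List.max? best (fun y => y)).getD 0

-- ===== PORT B =====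
-- run = max(run - 1, v); append — the running-max sweep of Source B
def lsweep (run : Int) : List Int → List Int
  | [] => []
  | v :: vs => (max (run - 1) v) :: lsweep (max (run - 1) v) vs

-- best[0]/best[-1] would raise on empty best and left[c]/best_next[c] on a row longer than C (excluded by Pre_).
def faster_alt (points : List (List Int)) : Int :=
  let C : Nat := (points.headD []).length
  let best := (points.drop 1).foldl (fun best row =>
      let left := lsweep (PySem.List.pyGetD best 0 0) best
      let right := (lsweep (PySem.List.pyGetD best (-1) 0) best.reverse).reverse
      (PySem.List.enumerate row 0).foldl
        (fun bn ce => PySem.List.pySetD bn ce.1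
          (ce.2 + max (PySem.List.pyGetD left ce.1 0) (PySem.List.pyGetD right ce.1 0)))
        (List.replicate C (0 : Int))) (points.headD [])
  (PySem.List.max? best (fun y => y)).getD 0

-- ===== PRECONDITION & SPEC =====
-- Pre_ excludes exactly the inputs where A raises: empty input or an empty first row (IndexError on
-- points[0] / ValueError on an empty max), and any row longer than the first (IndexError on best_next[c]).
def Pre_faster (points : List (List Int)) : Prop :=
  points ≠ [] ∧ (points.headD []) ≠ [] ∧ ∀ r ∈ points, r.length ≤ (points.headD []).length
instance (points : List (List Int)) : Decidable (Pre_faster points) := by unfold Pre_faster; infer_instance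
def pvWitness_faster : List (List Int) := [[1, 2], [3, 4]]
def Spec_faster (points : List (List Int)) (out : Int) : Prop := out = faster_alt points
instance (points : List (List Int)) (out : Int) : Decidable (Spec_faster points out) := by unfold Spec_faster; infer_instance

-- ===== CLAIM (what is proved, stated in full; the proofs are below) =====
def Claim_equal_faster : Prop := ∀ (points : List (List Int)), Dom_faster points → Pre_faster points → Spec_faster points (faster points)

-- ===== LEMMAS AND PROOFS =====

-- max over f 0, …, f n
def nmax (f : Nat → Int) : Nat → Int
  | 0 => f 0
  | n+1 => max (nmax f n) (f (n+1))

theorem nmax_cons (f : Nat → Int) (n : Nat) :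
    nmax f (n+1) = max (f 0) (nmax (fun j => f (j+1)) n) := by
  induction n with
  | zero => simp [nmax]
  | succ k ih =>
    rw [show k+1+1 = (k+1)+1 from rfl, nmax, ih, nmax]
    rw [max_assoc]

theorem le_nmax (f : Nat → Int) (n j : Nat) (h : j ≤ n) : f j ≤ nmax f n := by
  induction n with
  | zero => interval_cases j; simp [nmax]
  | succ k ih =>
    rcases Nat.lt_or_ge j (k+1) with h'|h'
    · exact le_trans (ih (by omega)) (le_max_left _ _)
    · have : j = k+1 := by omega
      subst this; exact le_max_right _ _

theorem nmax_le (f : Nat → Int) (n : Nat) (m : Int) (h : ∀ j ≤ n, f j ≤ m) : nmax f n ≤ m := by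
  induction n with
  | zero => exact h 0 (by omega)
  | succ k ih =>
    exact max_le (ih (fun j hj => h j (by omega))) (h (k+1) (by omega))

theorem nmax_congr (f g : Nat → Int) (n : Nat) (h : ∀ j ≤ n, f j = g j) : nmax f n = nmax g n := by
  induction n with
  | zero => exact h 0 (by omega)
  | succ k ih =>
    rw [nmax, nmax, ih (fun j hj => h j (by omega)), h (k+1) (by omega)]

theorem foldl_max_eq_nmax (l : List Int) (a : Int) (hl : l ≠ []) :
    l.foldl max a = max a (nmax (fun j => l.getD j 0) (l.length - 1)) := by
  induction l generalizing a with
  | nil => exact absurd rfl hl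
  | cons x t ih =>
    cases t with
    | nil => simp [nmax]
    | cons y s =>
      rw [List.foldl_cons, ih (max a x) (by simp)]
      have h1 : (x :: y :: s).length - 1 = ((y::s).length - 1) + 1 := by simp
      rw [h1, nmax_cons]
      have h2 : nmax (fun j => (x :: y :: s).getD (j+1) 0) ((y::s).length - 1)
          = nmax (fun j => (y :: s).getD j 0) ((y::s).length - 1) :=
        nmax_congr _ _ _ (fun j _ => by simp)
      rw [h2]
      have : (x :: y :: s).getD 0 0 = x := rfl
      rw [this, max_assoc]

theorem max?_getD_eq_nmax (l : List Int) (hl : l ≠ []) :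
    (PySem.List.max? l (fun y => y)).getD 0 = nmax (fun j => l.getD j 0) (l.length - 1) := by
  cases l with
  | nil => exact absurd rfl hl
  | cons x t =>
    rw [PySem.List.max?_id_cons, Option.getD_some]
    cases t with
    | nil => simp [nmax]
    | cons y s =>
      rw [foldl_max_eq_nmax _ _ (by simp)]
      have h1 : (x :: y :: s).length - 1 = ((y::s).length - 1) + 1 := by simp
      rw [h1, nmax_cons]
      have h2 : nmax (fun j => (x :: y :: s).getD (j+1) 0) ((y::s).length - 1)
          = nmax (fun j => (y :: s).getD j 0) ((y::s).length - 1) :=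
        nmax_congr _ _ _ (fun j _ => by simp)
      rw [h2]
      have : (x :: y :: s).getD 0 0 = x := rfl
      rw [this]

theorem fasterInner_eq_nmax (c : Int) (b : List Int) (hb : b ≠ []) :
    fasterInner c b = nmax (fun j => b.getD j 0 - |c - (j : Int)|) (b.length - 1) := by
  have h0 : 0 < b.length := List.length_pos_iff.mpr hb
  unfold fasterInner
  have hlen : ((PySem.List.enumerate b 0).map (fun jp => jp.2 - |c - jp.1|)).length = b.length := by
    simp [PySem.List.length_enumerate]
  have hne : (PySem.List.enumerate b 0).map (fun jp => jp.2 - |c - jp.1|) ≠ [] := by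
    intro h
    have := congrArg List.length h
    rw [hlen] at this
    simp only [List.length_nil] at this
    omega
  rw [max?_getD_eq_nmax _ hne, hlen]
  apply nmax_congr
  intro j hj
  have hjb : j < b.length := by omega
  rw [List.getD_eq_getElem?_getD, List.getD_eq_getElem?_getD]
  simp [PySem.List.getElem?_enumerate, List.getElem?_eq_getElem hjb]

-- abs split: max over all columns = max of the two one-sided maxima
theorem nmax_abs_split (b : List Int) (c : Nat) (hc : c < b.length) :
    nmax (fun j => b.getD j 0 - |(c : Int) - (j : Int)|) (b.length - 1)
      = max (nmax (fun j => b.getD j 0 - ((c : Int) - (j : Int))) c)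
            (nmax (fun t => b.getD (c + t) 0 - (t : Int)) (b.length - 1 - c)) := by
  apply le_antisymm
  · apply nmax_le
    intro j hj
    rcases Nat.lt_or_ge c j with h | h
    · refine le_trans (le_of_eq ?_) (le_trans (le_nmax _ (b.length - 1 - c) (j - c) (by omega))
        (le_max_right _ _))
      rw [abs_of_nonpos (by omega : (c : Int) - (j : Int) ≤ 0)]
      have h1 : c + (j - c) = j := by omega
      have h2 : ((j - c : Nat) : Int) = (j : Int) - (c : Int) := by omega
      rw [h1, h2]
      ring
    · refine le_trans (le_of_eq ?_) (le_trans (le_nmax _ c j h) (le_max_left _ _))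
      rw [abs_of_nonneg (by omega : (0:Int) ≤ (c : Int) - (j : Int))]
  · apply max_le
    · apply nmax_le
      intro j hj
      refine le_trans (le_of_eq ?_) (le_nmax _ (b.length - 1) j (by omega))
      rw [abs_of_nonneg (by omega : (0:Int) ≤ (c : Int) - (j : Int))]
    · apply nmax_le
      intro t ht
      refine le_trans (le_of_eq ?_) (le_nmax _ (b.length - 1) (c + t) (by omega))
      rw [abs_of_nonpos (by omega : (c : Int) - ((c + t : Nat) : Int) ≤ 0)]
      have h2 : ((c + t : Nat) : Int) = (c : Int) + (t : Int) := by omega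
      rw [h2]
      ring

theorem lsweep_length (p : Int) (xs : List Int) : (lsweep p xs).length = xs.length := by
  induction xs generalizing p with
  | nil => rfl
  | cons v vs ih => simp [lsweep, ih]

theorem lsweep_getD (xs : List Int) (p : Int) (i : Nat) (hi : i < xs.length) :
    (lsweep p xs).getD i 0
      = max (p - ((i : Int) + 1)) (nmax (fun j => xs.getD j 0 - ((i : Int) - (j : Int))) i) := by
  induction xs generalizing p i with
  | nil => simp at hi
  | cons v vs ih =>
    cases i with
    | zero => simp [lsweep, nmax]
    | succ i =>
      have hi' : i < vs.length := by simpa using hi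
      have hstep : (lsweep p (v :: vs)).getD (i+1) 0 = (lsweep (max (p-1) v) vs).getD i 0 := rfl
      rw [hstep, ih (max (p-1) v) i hi', nmax_cons]
      have hcg : nmax (fun j => (v :: vs).getD (j+1) 0 - ((((i+1 : Nat)) : Int) - ((j+1 : Nat) : Int))) i
          = nmax (fun j => vs.getD j 0 - ((i : Int) - (j : Int))) i := by
        apply nmax_congr
        intro j hj
        have : (((i+1 : Nat)) : Int) - ((j+1 : Nat) : Int) = (i : Int) - (j : Int) := by push_cast; ring
        rw [this]
        rfl
      rw [hcg]
      have h0 : (v :: vs).getD 0 0 = v := rfl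
      rw [h0]
      have hd : max (p - 1) v - ((i : Int) + 1)
          = max (p - (((i+1 : Nat) : Int) + 1)) (v - (((i+1 : Nat) : Int) - ((0 : Nat) : Int))) := by
        rw [← max_sub_sub_right]
        congr 1 <;> push_cast <;> ring
      rw [hd, max_assoc]

theorem left_getD (b : List Int) (_hb : b ≠ []) (i : Nat) (hi : i < b.length) :
    (lsweep (PySem.List.pyGetD b 0 0) b).getD i 0
      = nmax (fun j => b.getD j 0 - ((i : Int) - (j : Int))) i := by
  rw [lsweep_getD b _ i hi]
  apply max_eq_right
  refine le_trans ?_ (le_nmax (fun j => b.getD j 0 - ((i : Int) - (j : Int))) i 0 (Nat.zero_le _))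
  have hf0 : (fun j => b.getD j 0 - ((i : Int) - (j : Int))) 0 = b.getD 0 0 - (i : Int) := by norm_num
  rw [hf0, PySem.List.pyGetD_zero]
  omega

theorem right_getD (b : List Int) (hb : b ≠ []) (i : Nat) (hi : i < b.length) :
    ((lsweep (PySem.List.pyGetD b (-1) 0) b.reverse).reverse).getD i 0
      = nmax (fun t => b.getD (i + t) 0 - (t : Int)) (b.length - 1 - i) := by
  have h0 : 0 < b.length := List.length_pos_iff.mpr hb
  set k : Nat := b.length - 1 - i with hk
  have hkr : k < b.reverse.length := by simp; omega
  have hlL : (lsweep (PySem.List.pyGetD b (-1) 0) b.reverse).length = b.length := by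
    rw [lsweep_length]; simp
  -- getD of the reversed sweep
  have hrev : ((lsweep (PySem.List.pyGetD b (-1) 0) b.reverse).reverse).getD i 0
      = (lsweep (PySem.List.pyGetD b (-1) 0) b.reverse).getD k 0 := by
    rw [List.getD_eq_getElem (hn := by simp [hlL]; omega),
        List.getD_eq_getElem (hn := by rw [lsweep_length]; simpa using hkr),
        List.getElem_reverse]
    congr 1
    omega
  rw [hrev, lsweep_getD _ _ k (by simpa using hkr)]
  -- the initial term best[-1] - (k+1) is dominated by the j = 0 term
  have hlast : PySem.List.pyGetD b (-1) 0 = b.getD (b.length - 1) 0 := by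
    rw [PySem.List.pyGetD_neg_one b 0 hb, List.getLast_eq_getElem, List.getD_eq_getElem (hn := by omega)]
  have hrj : ∀ j ≤ k, b.reverse.getD j 0 = b.getD (b.length - 1 - j) 0 := by
    intro j hj
    rw [List.getD_eq_getElem (hn := by simpa using (by omega : j < b.reverse.length)),
        List.getD_eq_getElem (hn := by omega), List.getElem_reverse]
  have hmr : max (PySem.List.pyGetD b (-1) 0 - ((k : Int) + 1))
      (nmax (fun j => b.reverse.getD j 0 - ((k : Int) - (j : Int))) k)
      = nmax (fun j => b.reverse.getD j 0 - ((k : Int) - (j : Int))) k := by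
    apply max_eq_right
    refine le_trans ?_ (le_nmax _ k 0 (Nat.zero_le _))
    rw [hrj 0 (Nat.zero_le _), hlast]
    simp only [Nat.sub_zero]
    push_cast
    omega
  rw [hmr]
  -- reindex j ↦ k - j
  apply le_antisymm
  · apply nmax_le
    intro j hj
    refine le_trans (le_of_eq ?_) (le_nmax _ (b.length - 1 - i) (k - j) (by omega))
    rw [hrj j hj]
    have h1 : i + (k - j) = b.length - 1 - j := by omega
    have h2 : ((k - j : Nat) : Int) = (k : Int) - (j : Int) := by omega
    rw [h1, h2]
  · apply nmax_le
    intro t ht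
    refine le_trans (le_of_eq ?_) (le_nmax _ k (k - t) (by omega))
    rw [hrj (k - t) (by omega)]
    have h1 : b.length - 1 - (k - t) = i + t := by omega
    have h2 : (k : Int) - ((k - t : Nat) : Int) = (t : Int) := by omega
    rw [h1, h2]

-- A's inner loop: fill [0]*C by enumerate-indexed assignment
theorem afold_spec (row : List Int) (g : Int → Int → Int) :
    ∀ (s : Nat) (init : List Int), s + row.length ≤ init.length →
    ((PySem.List.enumerate row (s : Int)).foldl
        (fun bn ce => PySem.List.pySetD bn ce.1 (g ce.1 ce.2)) init).length = init.length ∧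
    ∀ i, ((PySem.List.enumerate row (s : Int)).foldl
        (fun bn ce => PySem.List.pySetD bn ce.1 (g ce.1 ce.2)) init).getD i 0
      = if s ≤ i ∧ i < s + row.length then g (i : Int) (row.getD (i - s) 0) else init.getD i 0 := by
  induction row with
  | nil =>
    intro s init hle
    refine ⟨by simp [PySem.List.enumerate_nil], ?_⟩
    intro i
    rw [if_neg (by simp only [List.length_nil]; omega)]
    simp [PySem.List.enumerate_nil]
  | cons v vs ih =>
    intro s init hle
    have hsl : s < init.length := by simp at hle; omega
    rw [PySem.List.enumerate_cons, List.foldl_cons]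
    have hset : PySem.List.pySetD init (s : Int) (g (s : Int) v) = init.set s (g (s : Int) v) :=
      PySem.List.pySetD_natCast init s _
    have hcast : ((s : Int) + 1) = (((s + 1 : Nat)) : Int) := by push_cast; ring
    rw [hset, hcast]
    have hle' : (s + 1) + vs.length ≤ (init.set s (g (s : Int) v)).length := by
      simp at hle ⊢; omega
    obtain ⟨ihlen, ihget⟩ := ih (s + 1) (init.set s (g (s : Int) v)) hle'
    refine ⟨by rw [ihlen]; simp, ?_⟩
    intro i
    rw [ihget i]
    have hgset : ∀ m, (init.set s (g (s : Int) v)).getD m 0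
        = if m = s then g (s : Int) v else init.getD m 0 := by
      intro m
      rw [List.getD_eq_getElem?_getD, List.getD_eq_getElem?_getD, List.getElem?_set]
      by_cases h : s = m
      · subst h
        rw [if_pos rfl, if_pos rfl, if_pos hsl]
        rfl
      · rw [if_neg h, if_neg (fun hh => h hh.symm)]
    by_cases h1 : s + 1 ≤ i ∧ i < s + 1 + vs.length
    · rw [if_pos h1, if_pos (by simp only [List.length_cons]; omega)]
      have : (v :: vs).getD (i - s) 0 = vs.getD (i - (s + 1)) 0 := by
        have : i - s = (i - (s + 1)) + 1 := by omega
        rw [this]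
        rfl
      rw [this]
    · rw [if_neg h1, hgset i]
      by_cases h2 : i = s
      · subst h2
        rw [if_pos rfl, if_pos (by simp only [List.length_cons]; omega)]
        have : (v :: vs).getD (i - i) 0 = v := by simp
        rw [this]
      · rw [if_neg h2, if_neg (by simp at h1 ⊢; omega)]

-- the per-row transforms agree: each assigned cell gets the same value
theorem foldl_fun_congr {α β : Type} (l : List α) (f g : β → α → β)
    (h : ∀ x ∈ l, ∀ acc, f acc x = g acc x) : ∀ init, l.foldl f init = l.foldl g init := by
  induction l with
  | nil => intro _; rfl
  | cons x xs ih =>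
    intro init
    rw [List.foldl_cons, List.foldl_cons, h x (by simp)]
    exact ih (fun y hy acc => h y (by simp [hy]) acc) _

theorem row_eq (b row : List Int) (hb : b ≠ []) (hlen : row.length ≤ b.length) :
    (PySem.List.enumerate row 0).foldl
        (fun bn ce => PySem.List.pySetD bn ce.1 (ce.2 + fasterInner ce.1 b))
        (List.replicate b.length (0 : Int))
      = (PySem.List.enumerate row 0).foldl
        (fun bn ce => PySem.List.pySetD bn ce.1 (ce.2 + max
            (PySem.List.pyGetD (lsweep (PySem.List.pyGetD b 0 0) b) ce.1 0)
            (PySem.List.pyGetD ((lsweep (PySem.List.pyGetD b (-1) 0) b.reverse).reverse) ce.1 0)))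
        (List.replicate b.length (0 : Int)) := by
  apply foldl_fun_congr
  intro ce hce acc
  obtain ⟨k, hk, hval⟩ := (PySem.List.mem_enumerate_iff row 0 ce).mp hce
  subst hval
  have hkb : k < b.length := by omega
  simp only [zero_add]
  congr 2
  rw [PySem.List.pyGetD_natCast, PySem.List.pyGetD_natCast,
      fasterInner_eq_nmax _ b hb, nmax_abs_split b k hkb, left_getD b hb k hkb,
      right_getD b hb k hkb]

-- outer loop: the two per-row transforms, iterated over the remaining rows, agree and keep width C
theorem outer_eq (C : Nat) (hC : 0 < C) (rest : List (List Int)) :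
    ∀ (b : List Int), b.length = C → (∀ r ∈ rest, r.length ≤ C) →
    (rest.foldl (fun best rowNext =>
        (PySem.List.enumerate rowNext 0).foldl
          (fun bn ce => PySem.List.pySetD bn ce.1 (ce.2 + fasterInner ce.1 best))
          (List.replicate C (0 : Int))) b
      = rest.foldl (fun best row =>
          (PySem.List.enumerate row 0).foldl
            (fun bn ce => PySem.List.pySetD bn ce.1 (ce.2 + max
              (PySem.List.pyGetD (lsweep (PySem.List.pyGetD best 0 0) best) ce.1 0)
              (PySem.List.pyGetD ((lsweep (PySem.List.pyGetD best (-1) 0) best.reverse).reverse) ce.1 0)))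
            (List.replicate C (0 : Int))) b) ∧
    (rest.foldl (fun best rowNext =>
        (PySem.List.enumerate rowNext 0).foldl
          (fun bn ce => PySem.List.pySetD bn ce.1 (ce.2 + fasterInner ce.1 best))
          (List.replicate C (0 : Int))) b).length = C := by
  induction rest with
  | nil => exact fun b hb _ => ⟨rfl, hb⟩
  | cons row rest' ih =>
    intro b hbC hr
    have hb : b ≠ [] := by
      intro h
      rw [h] at hbC
      simp at hbC
      omega
    have hrowb : row.length ≤ b.length := by rw [hbC]; exact hr row (by simp)
    have hstep := row_eq b row hb hrowb
    rw [hbC] at hstep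
    have hAlen : ((PySem.List.enumerate row 0).foldl
        (fun bn ce => PySem.List.pySetD bn ce.1 (ce.2 + fasterInner ce.1 b))
        (List.replicate C (0 : Int))).length = C := by
      have := (afold_spec row (fun c e => e + fasterInner c b) 0
        (List.replicate C (0 : Int)) (by simp; omega)).1
      simpa using this
    rw [List.foldl_cons, List.foldl_cons, ← hstep]
    exact ih _ hAlen (fun r hrm => hr r (by simp [hrm]))

theorem faster_spec : Claim_equal_faster := by
  intro pts _ hpre
  obtain ⟨hne, hh, hrect⟩ := hpre
  unfold Spec_faster
  cases pts with
  | nil => exact absurd rfl hne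
  | cons p0 rest =>
    have hh' : p0 ≠ [] := by simpa using hh
    have hC : 0 < p0.length := List.length_pos_iff.mpr hh'
    simp only [faster, faster_alt, List.headD_cons, List.drop_succ_cons, List.drop_zero]
    have hout := outer_eq p0.length hC rest p0 rfl
      (fun r hr => by simpa using hrect r (by simp [hr]))
    rw [hout.1]
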